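-- pv_equiv track=rewrite | github.com/miethe/CCDash | backend/services/test_health.py | _status_totals
-- ===== SOURCE A (Python) =====
-- from typing import Any
--
-- _FAILED_STATUSES = {"failed", "error", "xpassed"}
--
-- _SKIPPED_STATUSES = {"skipped", "xfailed"}
--
-- def _status_totals(rows: list[dict[str, Any]]) -> tuple[int, int, int, int]:
--     passed = 0
--     failed = 0
--     skipped = 0
--     for row in rows:
--         status = str(row.get("status") or "").strip().lower()
--         if status in _FAILED_STATUSES:
--             failed += 1
--         elif status in _SKIPPED_STATUSES:
--             skipped += 1
--         else:
--             passed += 1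
--     total = passed + failed + skipped
--     return total, passed, failed, skipped
-- ===== SOURCE B (Python) =====
-- from typing import Any
--
-- _FAILED_STATUSES = {"failed", "error", "xpassed"}
--
-- _SKIPPED_STATUSES = {"skipped", "xfailed"}
--
-- def _status_totals(rows: list[dict[str, Any]]) -> tuple[int, int, int, int]:
--     # Tabulate-then-aggregate: one tally pass with no pass/fail/skip branching,
--     # then read the failed/skipped totals off the table; passes are the remainder.
--     statuses = [str(row.get("status") or "").strip().lower() for row in rows]
--     counts: dict[str, int] = {}
--     for s in statuses:
--         counts[s] = counts.get(s, 0) + 1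
--     total = len(rows)
--     failed = sum(counts.get(s, 0) for s in _FAILED_STATUSES)
--     skipped = sum(counts.get(s, 0) for s in _SKIPPED_STATUSES)
--     passed = total - failed - skipped
--     return total, passed, failed, skipped
-- ===== Notes on version B (the rewrite author's own statement) =====
-- stated objective: idiomatic
-- what changed: B replaces A's per-row three-way if/elif/else counting with a tabulate-then-aggregate shape: one branchless tally pass building a status->count table, then failed/skipped read off the table by summing over the status sets and passed computed as the remainder total - failed - skipped.
import Mathlib
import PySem

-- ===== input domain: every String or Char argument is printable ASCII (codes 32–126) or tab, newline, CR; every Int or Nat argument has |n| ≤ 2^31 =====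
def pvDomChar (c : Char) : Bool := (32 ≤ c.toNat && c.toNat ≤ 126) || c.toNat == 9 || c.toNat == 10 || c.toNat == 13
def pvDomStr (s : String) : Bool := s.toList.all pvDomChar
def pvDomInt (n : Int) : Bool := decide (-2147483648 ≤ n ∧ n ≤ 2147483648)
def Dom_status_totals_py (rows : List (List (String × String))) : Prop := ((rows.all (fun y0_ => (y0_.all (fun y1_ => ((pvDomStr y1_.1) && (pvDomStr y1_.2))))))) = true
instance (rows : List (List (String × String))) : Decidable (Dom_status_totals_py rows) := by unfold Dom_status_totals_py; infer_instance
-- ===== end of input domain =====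

-- B replaces A's per-row three-way branch by a tally table plus aggregation; equivalence on the return value (no mutation involved).

-- status = str(row.get("status") or "").strip().lower()   (values are strings; `or ""` maps "" / missing to "")
def pvNorm (row : List (String × String)) : String :=
  PySem.Str.lower (PySem.Str.strip ((row.lookup "status").getD ""))

def pvFailed : List String := ["failed", "error", "xpassed"]
def pvSkipped : List String := ["skipped", "xfailed"]

-- ===== PORT A =====
def status_totals_py (rows : List (List (String × String))) : Int × Int × Int × Int :=
  let r : Int × Int × Int := rows.foldl (fun acc row =>
    let status := pvNorm row
    if status ∈ pvFailed then (acc.1, acc.2.1 + 1, acc.2.2)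
    else if status ∈ pvSkipped then (acc.1, acc.2.1, acc.2.2 + 1)
    else (acc.1 + 1, acc.2.1, acc.2.2)) (0, 0, 0)
  (r.1 + r.2.1 + r.2.2, r.1, r.2.1, r.2.2)

-- ===== PORT B =====
def status_totals_py_alt (rows : List (List (String × String))) : Int × Int × Int × Int :=
  let statuses := rows.map pvNorm
  let counts : PySem.Dict String Int :=
    statuses.foldl (fun d x => d.insert x (d.getD x 0 + 1)) PySem.Dict.empty
  let total : Int := rows.length
  let failed : Int := (pvFailed.map (fun s => counts.getD s 0)).sum
  let skipped : Int := (pvSkipped.map (fun s => counts.getD s 0)).sum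
  (total, total - failed - skipped, failed, skipped)

-- ===== PRECONDITION & SPEC =====
def Spec_status_totals_py (rows : List (List (String × String))) (out : Int × Int × Int × Int) : Prop := out = status_totals_py_alt rows
instance (rows : List (List (String × String))) (out : Int × Int × Int × Int) : Decidable (Spec_status_totals_py rows out) := by unfold Spec_status_totals_py; infer_instance

-- ===== CLAIM (what is proved, stated in full; the proofs are below) =====
def Claim_equal_status_totals_py : Prop := ∀ (rows : List (List (String × String))), Dom_status_totals_py rows → Spec_status_totals_py rows (status_totals_py rows)

-- ===== LEMMAS AND PROOFS =====

-- A's loop, expressed over the list of normalized statuses with a generalized accumulator.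
theorem pvFoldA (l : List String) (p f k : Int) :
    l.foldl (fun (acc : Int × Int × Int) status =>
      if status ∈ pvFailed then (acc.1, acc.2.1 + 1, acc.2.2)
      else if status ∈ pvSkipped then (acc.1, acc.2.1, acc.2.2 + 1)
      else (acc.1 + 1, acc.2.1, acc.2.2)) (p, f, k)
    = (p + (l.countP (fun s => !decide (s ∈ pvFailed) && !decide (s ∈ pvSkipped))),
       f + (l.countP (fun s => decide (s ∈ pvFailed))),
       k + (l.countP (fun s => !decide (s ∈ pvFailed) && decide (s ∈ pvSkipped)))) := by
  induction l generalizing p f k with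
  | nil => simp
  | cons x xs ih =>
    by_cases hf : x ∈ pvFailed
    · simp [hf, ih]; omega
    · by_cases hk : x ∈ pvSkipped
      · simp [hf, hk, ih]; omega
      · simp [hf, hk, ih]; omega

theorem pvCountFailed (l : List String) :
    ((pvFailed.map (fun s =>
        (l.foldl (fun (d : PySem.Dict String Int) x => d.insert x (d.getD x 0 + 1)) PySem.Dict.empty).getD s 0)).sum)
    = (l.countP (fun s => decide (s ∈ pvFailed))) := by
  simp only [pvFailed, List.map_cons, List.map_nil, List.sum_cons, List.sum_nil,
    PySem.Dict.getD_foldl_insert_add_one]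
  induction l with
  | nil => simp
  | cons x xs ih =>
    by_cases h1 : x = "failed" <;> by_cases h2 : x = "error" <;> by_cases h3 : x = "xpassed" <;>
      simp_all <;> omega

theorem pvCountSkipped (l : List String) :
    ((pvSkipped.map (fun s =>
        (l.foldl (fun (d : PySem.Dict String Int) x => d.insert x (d.getD x 0 + 1)) PySem.Dict.empty).getD s 0)).sum)
    = (l.countP (fun s => decide (s ∈ pvSkipped))) := by
  simp only [pvSkipped, List.map_cons, List.map_nil, List.sum_cons, List.sum_nil,
    PySem.Dict.getD_foldl_insert_add_one]
  induction l with
  | nil => simp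
  | cons x xs ih =>
    by_cases h1 : x = "skipped" <;> by_cases h2 : x = "xfailed" <;>
      simp_all <;> omega

-- the three counters partition the list
theorem pvPartition (l : List String) :
    l.countP (fun s => decide (s ∈ pvFailed))
    + l.countP (fun s => !decide (s ∈ pvFailed) && decide (s ∈ pvSkipped))
    + l.countP (fun s => !decide (s ∈ pvFailed) && !decide (s ∈ pvSkipped)) = l.length := by
  induction l with
  | nil => simp
  | cons x xs ih =>
    by_cases hf : x ∈ pvFailed <;> by_cases hk : x ∈ pvSkipped <;>
      simp_all <;> omega

-- disjointness: a failed status is never a skipped one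
theorem pvDisj (l : List String) :
    l.countP (fun s => !decide (s ∈ pvFailed) && decide (s ∈ pvSkipped))
    = l.countP (fun s => decide (s ∈ pvSkipped)) := by
  apply List.countP_congr
  intro s _
  by_cases hk : s ∈ pvSkipped
  · have hf : s ∉ pvFailed := by
      simp only [pvFailed, pvSkipped, List.mem_cons] at hk ⊢
      rcases hk with h | h | h <;> first | (subst h; decide) | cases h
    simp [hf, hk]
  · simp [hk]

-- ===== VERDICT (by name: the statement is the Claim_ definition above) =====
theorem status_totals_py_spec : Claim_equal_status_totals_py := by
  unfold Claim_equal_status_totals_py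
  intro rows _
  unfold Spec_status_totals_py status_totals_py status_totals_py_alt
  have hmap : rows.foldl (fun (acc : Int × Int × Int) row =>
      let status := pvNorm row
      if status ∈ pvFailed then (acc.1, acc.2.1 + 1, acc.2.2)
      else if status ∈ pvSkipped then (acc.1, acc.2.1, acc.2.2 + 1)
      else (acc.1 + 1, acc.2.1, acc.2.2)) (0, 0, 0)
      = (rows.map pvNorm).foldl (fun (acc : Int × Int × Int) status =>
      if status ∈ pvFailed then (acc.1, acc.2.1 + 1, acc.2.2)
      else if status ∈ pvSkipped then (acc.1, acc.2.1, acc.2.2 + 1)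
      else (acc.1 + 1, acc.2.1, acc.2.2)) (0, 0, 0) := by
    rw [List.foldl_map]
  simp only [hmap, pvFoldA, pvCountFailed, pvCountSkipped]
  set l := rows.map pvNorm with hl
  have hlen : l.length = rows.length := by simp [hl]
  have h1 := pvPartition l
  have h2 := pvDisj l
  refine Prod.ext ?_ (Prod.ext ?_ (Prod.ext ?_ ?_)) <;> simp <;> omega
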